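-- pv_equiv track=rewrite | github.com/HubertKaluzny/GSAUltra201808 | 3-Down/solution.py | solution
-- ===== SOURCE A (Python) =====
-- def solution(s):
--     minScore = pow(2, len(s))
--     for a in range(0, len(s)):
--         for b in range(a + 1, len(s)):
--             for c in range(b + 1, len(s)):
--                 groups = []
--                 groups.append(s[:a])
--                 groups.append(s[a:b])
--                 groups.append(s[b:c])
--                 groups.append(s[c:])
--
--                 if '' in groups:
--                     continue
--
--                 score = 0
--                 for g in groups:
--                     score += longestPalindrome(g)
--
--                 if score < minScore:
--                     minScore = score
--     return minScore
--
-- def longestPalindrome(s):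
--     charSet = list(set(s))
--
--     palindromeLength = 0
--     hasMiddle = False
--
--     for char in charSet:
--         count = s.count(char)
--         while count > 3:
--             palindromeLength += 2
--             count -= 2
--
--         if count == 1 and not hasMiddle:
--             palindromeLength += 1
--             hasMiddle = True
--
--         if count == 2:
--             palindromeLength += 2
--         elif count == 3:
--             if hasMiddle:
--                 palindromeLength += 2
--             else:
--                 hasMiddle = True
--                 palindromeLength += 3
--
--
--     return palindromeLength
-- ===== SOURCE B (Python) =====
-- def solution(s):
--     n = len(s)
--     # odd[i] = set of characters occurring an odd number of times in s[:i]
--     odd = [set()]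
--     cur = set()
--     for ch in s:
--         if ch in cur:
--             cur = cur - {ch}
--         else:
--             cur = cur | {ch}
--         odd.append(cur)
--
--     def seg(i, j):
--         # longest palindrome buildable from the letters of s[i:j]
--         k = len(odd[i] ^ odd[j])
--         return (j - i) - k + (1 if k > 0 else 0)
--
--     best = 2 ** n
--     for a in range(1, n):
--         pa = seg(0, a)
--         for b in range(a + 1, n):
--             pb = pa + seg(a, b)
--             for c in range(b + 1, n):
--                 sc = pb + seg(b, c) + seg(c, n)
--                 if sc < best:
--                     best = sc
--     return best
-- ===== Notes on version B (the rewrite author's own statement) =====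
-- stated objective: faster
-- what changed: replaces per-split slicing plus per-character counting (longestPalindrome's set+count+while loop) by a one-pass table of prefix parity sets, so each segment's palindrome length is a closed formula (len - |odd-parity symmetric difference| + 1 if nonzero) computed from the table, dropping one factor of n
import Mathlib
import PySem

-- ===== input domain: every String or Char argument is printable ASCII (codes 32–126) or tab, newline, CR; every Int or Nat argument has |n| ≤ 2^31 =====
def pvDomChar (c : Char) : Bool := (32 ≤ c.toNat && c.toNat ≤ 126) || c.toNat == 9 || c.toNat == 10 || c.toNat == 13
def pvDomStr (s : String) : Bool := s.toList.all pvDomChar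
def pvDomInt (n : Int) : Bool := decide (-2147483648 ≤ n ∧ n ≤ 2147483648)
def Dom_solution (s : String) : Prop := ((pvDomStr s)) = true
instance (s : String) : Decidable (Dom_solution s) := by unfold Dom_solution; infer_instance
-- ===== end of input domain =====

-- B replaces A's per-split slicing and per-character counting by a precomputed table of prefix
-- parity sets and a closed-form segment palindrome length (measured faster; one factor of n less work).


-- ===== PORT A =====
-- 'while count > 3: palindromeLength += 2; count -= 2'
def lpWhile (pal count : Int) : Int × Int :=
  if 3 < count then lpWhile (pal + 2) (count - 2) else (pal, count)
termination_by count.toNat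
decreasing_by omega

-- one iteration of longestPalindrome's 'for char in charSet' body (state = (palindromeLength, hasMiddle));
-- count = s.count(char): for a 1-character needle str.count is exactly the character count
def lpIter (g : List Char) (st : Int × Bool) (char : Char) : Int × Bool :=
  let count : Int := (g.count char : Int)
  let r := lpWhile st.1 count
  let pal := r.1
  let count := r.2
  let r2 : Int × Bool := if count = 1 ∧ st.2 = false then (pal + 1, true) else (pal, st.2)
  let pal := r2.1
  let hasMiddle := r2.2
  if count = 2 then (pal + 2, hasMiddle)
  else if count = 3 then
    (if hasMiddle then (pal + 2, hasMiddle) else (pal + 3, true))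
  else (pal, hasMiddle)


-- longestPalindrome(s); iterates over charSet = list(set(s)): the result does not depend on
-- that iteration order (proved below via an order-independent closed form); the port folds
-- over PySem.Set.ofList's first-occurrence order
def longestPalindrome (g : List Char) : Int :=
  ((PySem.Set.ofList g).foldl (lpIter g) (0, false)).1

def solution (s : String) : Int :=
  let sl := s.toList
  let n : Int := (sl.length : Int)
  let minScore0 : Int := 2 ^ sl.length
  (PySem.List.pyRange 0 n 1).foldl (fun minScore a =>
    (PySem.List.pyRange (a + 1) n 1).foldl (fun minScore b =>
      (PySem.List.pyRange (b + 1) n 1).foldl (fun minScore c =>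
        let groups : List (List Char) :=
          [PySem.List.slice sl none (some a),
           PySem.List.slice sl (some a) (some b),
           PySem.List.slice sl (some b) (some c),
           PySem.List.slice sl (some c) none]
        if [] ∈ groups then minScore
        else
          let score := groups.foldl (fun sc g => sc + longestPalindrome g) 0
          if score < minScore then score else minScore) minScore) minScore) minScore0

-- ===== PORT B =====
-- 'cur = cur - {ch}' / 'cur = cur | {ch}'
def pvToggle (cur : PySem.Set Char) (ch : Char) : PySem.Set Char :=
  if PySem.Set.contains cur ch then PySem.Set.diff cur [ch] else PySem.Set.union cur [ch]

-- the first loop: builds the list 'odd' of prefix parity sets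
def pvOddTable (sl : List Char) : List (PySem.Set Char) :=
  (sl.foldl (fun (st : List (PySem.Set Char) × PySem.Set Char) ch =>
      let cur := pvToggle st.2 ch
      (st.1 ++ [cur], cur))
    ([PySem.Set.empty], PySem.Set.empty)).1

-- seg(i, j) = (j - i) - len(odd[i] ^ odd[j]) + (1 if that length > 0 else 0)
def pvSeg (odd : List (PySem.Set Char)) (i j : Int) : Int :=
  let k : Int := (PySem.Set.len (PySem.Set.symmDiff
      (PySem.List.pyGetD odd i PySem.Set.empty) (PySem.List.pyGetD odd j PySem.Set.empty)) : Int)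
  (j - i) - k + (if 0 < k then 1 else 0)

def solution_alt (s : String) : Int :=
  let sl := s.toList
  let n : Int := (sl.length : Int)
  let odd := pvOddTable sl
  let best0 : Int := 2 ^ sl.length
  (PySem.List.pyRange 1 n 1).foldl (fun best a =>
    let pa := pvSeg odd 0 a
    (PySem.List.pyRange (a + 1) n 1).foldl (fun best b =>
      let pb := pa + pvSeg odd a b
      (PySem.List.pyRange (b + 1) n 1).foldl (fun best c =>
        let sc := pb + pvSeg odd b c + pvSeg odd c n
        if sc < best then sc else best) best) best) best0

-- ===== PRECONDITION & SPEC =====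
def Spec_solution (s : String) (out : Int) : Prop := out = solution_alt s
instance (s : String) (out : Int) : Decidable (Spec_solution s out) := by unfold Spec_solution; infer_instance

-- ===== CLAIM (what is proved, stated in full; the proofs are below) =====
def Claim_equal_solution : Prop := ∀ (s : String), Dom_solution s → Spec_solution s (solution s)

-- ===== LEMMAS AND PROOFS =====

def lpRem (m : Nat) : Nat := if 3 < m then 2 + m % 2 else m

theorem lpWhile_spec (m : Nat) : ∀ (p : Int), lpWhile p (m : Int) = (p + m - lpRem m, (lpRem m : Int)) := by
  induction m using Nat.strong_induction_on with
  | _ m ih =>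
    intro p
    unfold lpWhile
    by_cases h : 3 < m
    · have h2 : ((m : Int) - 2) = ((m - 2 : Nat) : Int) := by omega
      rw [if_pos (by exact_mod_cast h), h2, ih (m - 2) (by omega)]
      have : lpRem (m - 2) = lpRem m := by unfold lpRem; split_ifs <;> omega
      rw [this]
      refine Prod.ext ?_ rfl
      push_cast; omega
    · rw [if_neg (by omega)]
      unfold lpRem
      rw [if_neg h]
      refine Prod.ext ?_ rfl
      push_cast; omega

theorem lpIter_core (m : Nat) (p : Int) (h : Bool) :
    (let count : Int := (m : Int)
     let r := lpWhile p count
     let pal := r.1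
     let count := r.2
     let r2 : Int × Bool := if count = 1 ∧ h = false then (pal + 1, true) else (pal, h)
     let pal := r2.1
     let hasMiddle := r2.2
     if count = 2 then (pal + 2, hasMiddle)
     else if count = 3 then
       (if hasMiddle then (pal + 2, hasMiddle) else (pal + 3, true))
     else (pal, hasMiddle)) =
      (p + ((m : Int) - ((m % 2 : Nat) : Int)) +
        (if m % 2 = 1 ∧ h = false then 1 else 0),
       h || decide (m % 2 = 1)) := by
  simp only [lpWhile_spec m p]
  rcases Nat.lt_or_ge 3 m with hgt | hle
  · have hrem : lpRem m = 2 + m % 2 := by unfold lpRem; rw [if_pos hgt]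
    rcases Nat.mod_two_eq_zero_or_one m with hm | hm <;>
      rw [hrem, hm] <;> cases h <;>
      · norm_num
        try push_cast
        try omega
  · have hrem : lpRem m = m := by unfold lpRem; rw [if_neg (by omega)]
    rw [hrem]
    interval_cases m <;> cases h <;>
      · simp
        try omega

theorem lpIter_spec (g : List Char) (st : Int × Bool) (c : Char) :
    lpIter g st c =
      (st.1 + ((g.count c : Int) - ((g.count c % 2 : Nat) : Int)) +
        (if g.count c % 2 = 1 ∧ st.2 = false then 1 else 0),
       st.2 || decide (g.count c % 2 = 1)) := by
  obtain ⟨p, h⟩ := st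
  exact lpIter_core (g.count c) p h

def pvOddB (g : List Char) (c : Char) : Bool := g.count c % 2 == 1

theorem lp_foldl_spec (g : List Char) (l : List Char) : ∀ (p : Int) (h : Bool),
    l.foldl (lpIter g) (p, h) =
      (p + (l.map (fun c => (g.count c : Int) - ((g.count c % 2 : Nat) : Int))).sum +
        (if h = false ∧ l.any (pvOddB g) then 1 else 0),
       h || l.any (pvOddB g)) := by
  induction l with
  | nil => intro p h; cases h <;> simp
  | cons c l ih =>
    intro p h
    rw [List.foldl_cons, lpIter_spec, ih]
    simp only [List.map_cons, List.sum_cons, List.any_cons, pvOddB]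
    cases h
    · rcases Nat.mod_two_eq_zero_or_one (g.count c) with hm | hm <;>
        · simp [hm]
          try constructor
          all_goals omega
    · simp
      ring

-- sum of counts over a nodup list containing every char of g is g.length
theorem sum_counts (g : List Char) : ∀ (l : List Char), l.Nodup → (∀ x ∈ g, x ∈ l) →
    (l.map (fun c => (g.count c : Int))).sum = (g.length : Int) := by
  induction g with
  | nil => intro l _ _; simp
  | cons a g ih =>
    intro l hnd hmem
    have h1 : (l.map (fun c => ((a :: g).count c : Int))).sum
        = (l.map (fun c => (g.count c : Int))).sum
          + (l.map (fun c => if c == a then (1:Int) else 0)).sum := by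
      rw [← List.sum_map_add]
      refine congrArg List.sum (List.map_congr_left ?_)
      intro c _
      simp only [List.count_cons]
      split_ifs with hca <;> simp_all
    have h2 : (l.map (fun c => if c == a then (1:Int) else 0)).sum = 1 := by
      rw [PySem.List.sum_map_ite_one_zero (fun c => c == a) l]
      have : l.countP (fun c => c == a) = l.count a := rfl
      rw [this, List.count_eq_one_of_mem hnd (hmem a (by simp))]
      rfl
    rw [h1, h2, ih l hnd (fun x hx => hmem x (by simp [hx]))]
    simp

theorem sum_parities (g : List Char) (l : List Char) :
    (l.map (fun c => ((g.count c % 2 : Nat) : Int))).sum = (l.countP (pvOddB g) : Int) := by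
  rw [← PySem.List.sum_map_ite_one_zero (pvOddB g) l]
  refine congrArg List.sum (List.map_congr_left ?_)
  intro c _
  rcases Nat.mod_two_eq_zero_or_one (g.count c) with hm | hm <;> simp [pvOddB, hm]

theorem sum_map_int_sub {α : Type} (f h : α → Int) (l : List α) :
    (l.map (fun c => f c - h c)).sum = (l.map f).sum - (l.map h).sum := by
  induction l with
  | nil => simp
  | cons a l ih => simp [ih]; ring

def pvOdds (g : List Char) : Nat := (PySem.Set.ofList g).countP (pvOddB g)

def pvLpVal (g : List Char) : Int :=
  (g.length : Int) - (pvOdds g : Int) + (if 0 < pvOdds g then 1 else 0)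

theorem longestPalindrome_eq (g : List Char) : longestPalindrome g = pvLpVal g := by
  unfold longestPalindrome pvLpVal
  rw [lp_foldl_spec g (PySem.Set.ofList g) 0 false]
  have hsub := sum_map_int_sub (fun c => (g.count c : Int))
      (fun c => ((g.count c % 2 : Nat) : Int)) (PySem.Set.ofList g)
  simp only [hsub, sum_counts g (PySem.Set.ofList g) (PySem.Set.nodup_ofList g)
      (fun x hx => (PySem.Set.mem_ofList g x).mpr hx),
    sum_parities g (PySem.Set.ofList g)]
  have hany : (PySem.Set.ofList g).any (pvOddB g) = decide (0 < pvOdds g) := by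
    unfold pvOdds
    rcases Nat.eq_zero_or_pos ((PySem.Set.ofList g).countP (pvOddB g)) with h0 | h0
    · have hall := List.countP_eq_zero.mp h0
      rw [h0]
      norm_num
      intro x hx
      simpa using hall x ((PySem.Set.mem_ofList g x).mpr hx)
    · obtain ⟨x, hx, hpx⟩ := List.countP_pos_iff.mp h0
      rw [decide_eq_true (by omega : 0 < (PySem.Set.ofList g).countP (pvOddB g))]
      exact List.any_eq_true.mpr ⟨x, hx, hpx⟩
  rw [hany]
  simp only [pvOdds, zero_add]
  split_ifs <;> simp_all

theorem mem_pvToggle (cur : PySem.Set Char) (ch x : Char) :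
    x ∈ pvToggle cur ch ↔ (if x = ch then x ∉ cur else x ∈ cur) := by
  unfold pvToggle
  by_cases hc : PySem.Set.contains cur ch = true
  · rw [if_pos hc, PySem.Set.mem_diff]
    have hch := (PySem.Set.contains_iff cur ch).mp hc
    by_cases hx : x = ch <;> simp [hx, hch]
  · rw [if_neg hc, PySem.Set.mem_union]
    have hch : ch ∉ cur := fun h => hc ((PySem.Set.contains_iff cur ch).mpr h)
    by_cases hx : x = ch <;> simp [hx, hch]

theorem nodup_pvToggle (cur : PySem.Set Char) (ch : Char) (h : cur.Nodup) :
    (pvToggle cur ch).Nodup := by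
  unfold pvToggle
  split_ifs
  · exact PySem.Set.nodup_diff cur [ch] h
  · exact PySem.Set.nodup_union cur [ch] h

theorem nodup_foldl_pvToggle (t : List Char) : ∀ (s0 : PySem.Set Char), s0.Nodup →
    (t.foldl pvToggle s0).Nodup := by
  induction t with
  | nil => intro s0 h; exact h
  | cons c t ih => intro s0 h; exact ih _ (nodup_pvToggle s0 c h)

theorem mem_foldl_pvToggle (t : List Char) : ∀ (s0 : PySem.Set Char) (x : Char),
    (x ∈ t.foldl pvToggle s0 ↔ ((x ∈ s0) ↔ t.count x % 2 = 0)) := by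
  induction t with
  | nil => intro s0 x; simp
  | cons c t ih =>
    intro s0 x
    rw [List.foldl_cons, ih (pvToggle s0 c) x, mem_pvToggle]
    by_cases hx : x = c
    · subst hx
      simp only [List.count_cons_self]
      by_cases hs : x ∈ s0 <;> simp [hs] <;> omega
    · rw [if_neg hx]
      simp [Ne.symm hx]

def pvPfx (sl : List Char) (i : Nat) : PySem.Set Char := (sl.take i).foldl pvToggle PySem.Set.empty

theorem oddTable_fold (t : List Char) : ∀ (acc : List (PySem.Set Char)) (cur : PySem.Set Char),
    t.foldl (fun (st : List (PySem.Set Char) × PySem.Set Char) ch =>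
        let cur := pvToggle st.2 ch
        (st.1 ++ [cur], cur)) (acc, cur)
      = (acc ++ (List.range t.length).map (fun i => (t.take (i + 1)).foldl pvToggle cur),
         t.foldl pvToggle cur) := by
  induction t with
  | nil => intro acc cur; simp
  | cons c t ih =>
    intro acc cur
    rw [List.foldl_cons, ih]
    simp only [List.length_cons, List.range_succ_eq_map, List.map_cons, List.map_map]
    simp [List.append_assoc, Function.comp_def]

theorem oddTable_eq (sl : List Char) :
    pvOddTable sl = (List.range (sl.length + 1)).map (pvPfx sl) := by
  unfold pvOddTable
  rw [oddTable_fold]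
  rw [List.range_succ_eq_map, List.map_cons, List.map_map]
  simp only [pvPfx, List.take_zero, List.foldl_nil]
  rfl

theorem oddTable_getD (sl : List Char) (i : Nat) (hi : i ≤ sl.length) :
    PySem.List.pyGetD (pvOddTable sl) (i : Int) PySem.Set.empty = pvPfx sl i := by
  rw [PySem.List.pyGetD_natCast, oddTable_eq]
  exact PySem.List.getD_map_range (pvPfx sl) (sl.length + 1) i PySem.Set.empty (by omega)

theorem mem_pvPfx (sl : List Char) (i : Nat) (x : Char) :
    x ∈ pvPfx sl i ↔ (sl.take i).count x % 2 = 1 := by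
  unfold pvPfx
  rw [mem_foldl_pvToggle]
  simp [PySem.Set.empty]

theorem pvSeg_eq (sl : List Char) (i j : Nat) (hij : i ≤ j) (hj : j ≤ sl.length) :
    pvSeg (pvOddTable sl) (i : Int) (j : Int) = pvLpVal ((sl.drop i).take (j - i)) := by
  set seg := (sl.drop i).take (j - i) with hseg
  have hsplit : sl.take j = sl.take i ++ seg := by
    rw [hseg, ← List.take_add]
    congr 1
    omega
  have hcount : ∀ x : Char, (sl.take j).count x = (sl.take i).count x + seg.count x := by
    intro x; rw [hsplit, List.count_append]
  have hmemsym : ∀ x : Char,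
      (x ∈ PySem.Set.symmDiff (pvPfx sl i) (pvPfx sl j) ↔ seg.count x % 2 = 1) := by
    intro x
    rw [PySem.Set.mem_symmDiff, mem_pvPfx, mem_pvPfx, hcount x]
    omega
  have hnd : (PySem.Set.symmDiff (pvPfx sl i) (pvPfx sl j)).Nodup :=
    PySem.Set.nodup_symmDiff _ _ (nodup_foldl_pvToggle _ _ List.nodup_nil)
      (nodup_foldl_pvToggle _ _ List.nodup_nil)
  have hndf : ((PySem.Set.ofList seg).filter (pvOddB seg)).Nodup :=
    (PySem.Set.nodup_ofList seg).filter _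
  have hperm : (PySem.Set.symmDiff (pvPfx sl i) (pvPfx sl j)).Perm
      ((PySem.Set.ofList seg).filter (pvOddB seg)) := by
    rw [List.perm_ext_iff_of_nodup hnd hndf]
    intro x
    rw [hmemsym x, List.mem_filter, PySem.Set.mem_ofList]
    unfold pvOddB
    constructor
    · intro h
      refine ⟨List.count_pos_iff.mp (by omega), by simpa using h⟩
    · intro ⟨_, h⟩; simpa using h
  have hlen : PySem.Set.len (PySem.Set.symmDiff
      (PySem.List.pyGetD (pvOddTable sl) (i : Int) PySem.Set.empty)
      (PySem.List.pyGetD (pvOddTable sl) (j : Int) PySem.Set.empty)) = (pvOdds seg : Int) := by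
    rw [oddTable_getD sl i (by omega), oddTable_getD sl j hj]
    unfold PySem.Set.len pvOdds
    rw [hperm.length_eq, List.countP_eq_length_filter]
  unfold pvSeg pvLpVal
  simp only [hlen]
  have hlseg : seg.length = j - i := by
    rw [hseg]
    simp only [List.length_take, List.length_drop]
    omega
  rw [hlseg]
  have : ((j : Int) - (i : Int)) = ((j - i : Nat) : Int) := by omega
  rw [this]
  norm_num

theorem foldl_keep {α : Type} (l : List α) (init : Int) :
    l.foldl (fun m (_ : α) => m) init = init := by
  induction l generalizing init with
  | nil => rfl
  | cons x l ih => exact ih init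

theorem main_eq (s : String) : solution s = solution_alt s := by
  unfold solution solution_alt
  simp only []
  set sl := s.toList with hsl
  set n : Int := (sl.length : Int) with hn
  rcases (by omega : n ≤ 0 ∨ 0 < n) with hn0 | hn0
  · rw [PySem.List.pyRange_one_eq_nil hn0, PySem.List.pyRange_one_eq_nil (by omega : n ≤ 1)]
    rfl
  -- peel a = 0 : every split with s[:0] = '' is skipped, the state is unchanged
  · rw [PySem.List.pyRange_one_cons hn0, List.foldl_cons]
    have hzero : ∀ (m : Int),
        (PySem.List.pyRange (0 + 1) n 1).foldl (fun m b =>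
          (PySem.List.pyRange (b + 1) n 1).foldl (fun m c =>
            if [] ∈ [PySem.List.slice sl none (some 0),
                     PySem.List.slice sl (some 0) (some b),
                     PySem.List.slice sl (some b) (some c),
                     PySem.List.slice sl (some c) none] then m
            else
              if [PySem.List.slice sl none (some 0),
                  PySem.List.slice sl (some 0) (some b),
                  PySem.List.slice sl (some b) (some c),
                  PySem.List.slice sl (some c) none].foldl
                    (fun sc g => sc + longestPalindrome g) 0 < m then
                [PySem.List.slice sl none (some 0),
                 PySem.List.slice sl (some 0) (some b),
                 PySem.List.slice sl (some b) (some c),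
                 PySem.List.slice sl (some c) none].foldl
                    (fun sc g => sc + longestPalindrome g) 0
              else m) m) m = m := by
      intro m
      have hempty : PySem.List.slice sl none (some (0 : Int)) = [] := by
        rw [PySem.List.slice_to sl (le_refl 0)]
        simp
      calc (PySem.List.pyRange (0 + 1) n 1).foldl _ m
          = (PySem.List.pyRange (0 + 1) n 1).foldl (fun m (_ : Int) => m) m := by
            apply PySem.List.foldl_congr_mem
            intro acc b _
            calc List.foldl _ acc (PySem.List.pyRange (b + 1) n 1)
                = List.foldl (fun m (_ : Int) => m) acc (PySem.List.pyRange (b + 1) n 1) := by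
                  apply PySem.List.foldl_congr_mem
                  intro acc2 c _
                  rw [hempty, if_pos (List.mem_cons_self)]
              _ = acc := foldl_keep _ acc
        _ = m := foldl_keep _ m
    rw [hzero]
    apply PySem.List.foldl_congr_mem
    intro m a ha
    rw [PySem.List.mem_pyRange_one] at ha
    apply PySem.List.foldl_congr_mem
    intro m2 b hb
    rw [PySem.List.mem_pyRange_one] at hb
    apply PySem.List.foldl_congr_mem
    intro m3 c hc
    rw [PySem.List.mem_pyRange_one] at hc
    have hA : a = ((a.toNat : Nat) : Int) := (Int.toNat_of_nonneg (by omega)).symm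
    have hB : b = ((b.toNat : Nat) : Int) := (Int.toNat_of_nonneg (by omega)).symm
    have hC : c = ((c.toNat : Nat) : Int) := (Int.toNat_of_nonneg (by omega)).symm
    set A := a.toNat
    set B := b.toNat
    set C := c.toNat
    have hAB : A ≤ B := by omega
    have hBC : B ≤ C := by omega
    have hCL : C ≤ sl.length := by omega
    have hA1 : 1 ≤ A := by omega
    have hABlt : A < B := by omega
    have hBClt : B < C := by omega
    have hCLlt : C < sl.length := by omega
    have h1 : PySem.List.slice sl none (some a) = sl.take A := by
      rw [hA, PySem.List.slice_to_natCast]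
    have h2 : PySem.List.slice sl (some a) (some b) = (sl.drop A).take (B - A) := by
      rw [hA, hB, PySem.List.slice_natCast]
    have h3 : PySem.List.slice sl (some b) (some c) = (sl.drop B).take (C - B) := by
      rw [hB, hC, PySem.List.slice_natCast]
    have h4 : PySem.List.slice sl (some c) none = sl.drop C := by
      rw [hC, PySem.List.slice_from_natCast]
    have hs1 : pvSeg (pvOddTable sl) 0 a = pvLpVal (sl.take A) := by
      rw [hA, (by norm_num : (0 : Int) = ((0 : Nat) : Int)),
        pvSeg_eq sl 0 A (by omega) (by omega)]
      simp
    have hs2 : pvSeg (pvOddTable sl) a b = pvLpVal ((sl.drop A).take (B - A)) := by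
      rw [hA, hB, pvSeg_eq sl A B hAB (by omega)]
    have hs3 : pvSeg (pvOddTable sl) b c = pvLpVal ((sl.drop B).take (C - B)) := by
      rw [hB, hC, pvSeg_eq sl B C hBC hCL]
    have hs4 : pvSeg (pvOddTable sl) c n = pvLpVal (sl.drop C) := by
      rw [hC, hn, pvSeg_eq sl C sl.length hCL (le_refl _)]
      congr 1
      exact List.take_of_length_le (by simp)
    have hne : ¬ ([] ∈ [PySem.List.slice sl none (some a),
          PySem.List.slice sl (some a) (some b),
          PySem.List.slice sl (some b) (some c),
          PySem.List.slice sl (some c) none]) := by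
      rw [h1, h2, h3, h4]
      intro hmem
      have hlen : ∀ g ∈ [sl.take A, (sl.drop A).take (B - A),
          (sl.drop B).take (C - B), sl.drop C], 0 < g.length := by
        intro g hg
        simp only [List.mem_cons, List.not_mem_nil, or_false] at hg
        rcases hg with rfl | rfl | rfl | rfl <;> simp <;> omega
      have := hlen [] hmem
      simp at this
    rw [if_neg hne, h1, h2, h3, h4]
    simp only [List.foldl_cons, List.foldl_nil, zero_add]
    rw [longestPalindrome_eq, longestPalindrome_eq, longestPalindrome_eq, longestPalindrome_eq,
      hs1, hs2, hs3, hs4]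

-- ===== VERDICT (by name: the statement is the Claim_ definition above) =====
theorem solution_spec : Claim_equal_solution := by
  intro s _
  unfold Spec_solution
  exact main_eq s
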